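-- pv_equiv track=rewrite | github.com/MrBrantCode/unitest_baseline | mut_generate/mist_train_cf/cf_96058/solution.py | count_capital_letters
-- ===== SOURCE A (Python) =====
-- def count_capital_letters(strings):
--     count = 0
--     open_parentheses = 0
--
--     for string in strings:
--         for char in string:
--             if char == '(':
--                 open_parentheses += 1
--             elif char == ')':
--                 open_parentheses -= 1
--             elif open_parentheses == 0 and char.isupper():
--                 count += 1
--
--     return count
-- ===== SOURCE B (Python) =====
-- def count_capital_letters(strings):
--     chars = [c for s in strings for c in s]
--     depths = []
--     d = 0
--     for c in chars:
--         depths.append(d)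
--         d += 1 if c == '(' else -1 if c == ')' else 0
--     return sum(1 for c, dep in zip(chars, depths) if dep == 0 and c.isupper())
-- ===== Notes on version B (the rewrite author's own statement) =====
-- stated objective: alternative
-- what changed: Replaces the single stateful pass (running depth counter with in-loop counting) by a build-then-filter decomposition: flatten all characters, materialise the prefix-depth-before-each-character table, then count uppercase characters at depth 0 in a separate zip/filter pass.
import Mathlib
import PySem

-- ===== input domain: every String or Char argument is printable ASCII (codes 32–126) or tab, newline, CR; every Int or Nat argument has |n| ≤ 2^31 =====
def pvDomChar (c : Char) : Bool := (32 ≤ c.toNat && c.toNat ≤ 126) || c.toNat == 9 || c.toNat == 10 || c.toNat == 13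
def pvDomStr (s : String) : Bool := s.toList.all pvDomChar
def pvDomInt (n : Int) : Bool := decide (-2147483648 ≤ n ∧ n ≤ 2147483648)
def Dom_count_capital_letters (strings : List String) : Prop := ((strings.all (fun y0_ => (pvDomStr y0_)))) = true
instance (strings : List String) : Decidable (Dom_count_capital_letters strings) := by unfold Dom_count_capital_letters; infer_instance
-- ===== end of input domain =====

-- B replaces A's single stateful pass by a flatten / prefix-depth-table / filter decomposition (same cost); equivalence proved on all inputs.


-- ===== PORT A =====
-- one step of A's inner loop: state = (count, open_parentheses)
def cclStepA (st : Int × Int) (c : Char) : Int × Int :=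
  if c = '(' then (st.1, st.2 + 1)
  else if c = ')' then (st.1, st.2 - 1)
  else if st.2 = 0 && PySem.Chars.isupper c then (st.1 + 1, st.2)
  else st

def count_capital_letters (strings : List String) : Int :=
  (strings.foldl (fun st s => s.toList.foldl cclStepA st) ((0 : Int), (0 : Int))).1

-- ===== PORT B =====
def cclDelta (c : Char) : Int := if c = '(' then 1 else if c = ')' then -1 else 0

def count_capital_letters_alt (strings : List String) : Int :=
  let chars := strings.flatMap (·.toList)
  -- the loop building the prefix-depth table (depths, d)
  let depths := (chars.foldl (fun (p : List Int × Int) c => (p.1 ++ [p.2], p.2 + cclDelta c)) ([], 0)).1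
  ((chars.zip depths).filter (fun p => p.2 == 0 && PySem.Chars.isupper p.1)).length

-- ===== PRECONDITION & SPEC =====
def Spec_count_capital_letters (strings : List String) (out : Int) : Prop := out = count_capital_letters_alt strings
instance (strings : List String) (out : Int) : Decidable (Spec_count_capital_letters strings out) := by unfold Spec_count_capital_letters; infer_instance

-- ===== CLAIM (what is proved, stated in full; the proofs are below) =====
def Claim_equal_count_capital_letters : Prop := ∀ (strings : List String), Dom_count_capital_letters strings → Spec_count_capital_letters strings (count_capital_letters strings)

-- ===== LEMMAS AND PROOFS =====

-- reference count: uppercase chars at depth 0, depths starting from d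
def cclCount (cs : List Char) (d : Int) : Int :=
  match cs with
  | [] => 0
  | c :: cs => (if d = 0 ∧ PySem.Chars.isupper c then 1 else 0) + cclCount cs (d + cclDelta c)

-- the prefix-depth table, as a recursion
def cclScan (cs : List Char) (d : Int) : List Int :=
  match cs with
  | [] => []
  | c :: cs => d :: cclScan cs (d + cclDelta c)

theorem cclFoldA (cs : List Char) (c d : Int) :
    cs.foldl cclStepA (c, d) = (c + cclCount cs d, d + (cs.map cclDelta).sum) := by
  induction cs generalizing c d with
  | nil => simp [cclCount]
  | cons x xs ih =>
    simp only [List.foldl_cons, cclStepA, cclCount, cclDelta, List.map_cons, List.sum_cons]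
    by_cases hx : x = '('
    · have hu : PySem.Chars.isupper '(' = false := by decide
      subst hx
      simp [ih, hu]
      ring_nf
    · by_cases hy : x = ')'
      · have hu : PySem.Chars.isupper ')' = false := by decide
        subst hy
        simp [ih, hu]
        constructor <;> ring_nf
      · by_cases hz : d = 0 ∧ PySem.Chars.isupper x = true
        · simp [hx, hy, hz.1, hz.2, ih]; ring
        · have hb : (d == 0 && PySem.Chars.isupper x) = false := by
            by_cases hd : d = 0
            · simp [hd] at hz ⊢; exact hz
            · simp [hd]
          simp [hx, hy, ih, hz]

theorem cclFoldDepths (cs : List Char) (acc : List Int) (d : Int) :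
    (cs.foldl (fun (p : List Int × Int) c => (p.1 ++ [p.2], p.2 + cclDelta c)) (acc, d)).1
      = acc ++ cclScan cs d := by
  induction cs generalizing acc d with
  | nil => simp [cclScan]
  | cons x xs ih => simp [cclScan, ih]

theorem cclZipCount (cs : List Char) (d : Int) :
    (((cs.zip (cclScan cs d)).filter (fun p => p.2 == 0 && PySem.Chars.isupper p.1)).length : Int)
      = cclCount cs d := by
  induction cs generalizing d with
  | nil => simp [cclCount]
  | cons x xs ih =>
    simp only [cclScan, List.zip_cons_cons, List.filter_cons, cclCount]
    by_cases h : d = 0 ∧ PySem.Chars.isupper x = true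
    · simp [h.1, h.2, ← ih]; ring
    · have hb : (d == 0 && PySem.Chars.isupper x) = false := by
        by_cases hd : d = 0
        · simp [hd] at h ⊢; exact h
        · simp [hd]
      simp [hb, ← ih, h]

theorem cclFoldA_flat (strings : List String) (st : Int × Int) :
    strings.foldl (fun st s => s.toList.foldl cclStepA st) st
      = (strings.flatMap (·.toList)).foldl cclStepA st := by
  induction strings generalizing st with
  | nil => simp
  | cons s ss ih => simp [List.flatMap_cons, List.foldl_append, ih]

-- ===== VERDICT (by name: the statement is the Claim_ definition above) =====
theorem count_capital_letters_spec : Claim_equal_count_capital_letters := by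
  intro strings _
  simp only [Spec_count_capital_letters, count_capital_letters, count_capital_letters_alt]
  rw [cclFoldA_flat, cclFoldA, cclFoldDepths, List.nil_append, cclZipCount]
  simp
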